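-- pv_equiv track=rewrite | github.com/superobserver/Conversations | OptimizedTwins2.py | get_operators
-- ===== SOURCE A (Python) =====
-- ALL_CLASSES = [1,7,11,13,17,19,23,29,31,37,41,43,47,49,53,59,61,67,71,73,77,79,83,89]
--
-- def get_operators(k):
--     operators = []
--     seen = set()
--     for z in ALL_CLASSES:
--         try:
--             o = (k * pow(z, -1, 90)) % 90
--             if o not in ALL_CLASSES: continue
--             pair = tuple(sorted([z, o]))
--             if pair in seen: continue
--             seen.add(pair)
--             z_eff = 91 if z == 1 else z
--             o_eff = 91 if o == 1 else o
--             l = 180 - (z_eff + o_eff)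
--             m = 90 - (z_eff + o_eff) + (z_eff * o_eff - k) // 90
--             operators.append((l, m, z_eff, z))
--             if z != o:
--                 operators.append((l, m, o_eff, o))
--         except ValueError:
--             continue
--     return operators
-- ===== SOURCE B (Python) =====
-- ALL_CLASSES = [1,7,11,13,17,19,23,29,31,37,41,43,47,49,53,59,61,67,71,73,77,79,83,89]
--
-- def get_operators(k):
--     # No modular inverse and no dedup set: recurse over suffixes of the
--     # (sorted) class list and brute-force test the congruence z*o = k (mod 90)
--     # for each partner o >= z, so every unordered pair is found exactly once,
--     # at its smaller member.
--     def go(rest):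
--         if not rest:
--             return []
--         z = rest[0]
--         out = []
--         for o in rest:
--             if (z * o - k) % 90 == 0:
--                 z_eff = 91 if z == 1 else z
--                 o_eff = 91 if o == 1 else o
--                 l = 180 - (z_eff + o_eff)
--                 m = 90 - (z_eff + o_eff) + (z_eff * o_eff - k) // 90
--                 out.append((l, m, z_eff, z))
--                 if z != o:
--                     out.append((l, m, o_eff, o))
--         return out + go(rest[1:])
--     return go(ALL_CLASSES)
-- ===== Notes on version B (the rewrite author's own statement) =====
-- stated objective: alternative
-- what changed: B drops the modular inverse (pow) and the seen-set dedup entirely: it recurses over suffixes of the sorted class list and brute-force tests the congruence z*o = k (mod 90) for each partner o >= z, so each unordered pair is found exactly once at its smaller member.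
import Mathlib
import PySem

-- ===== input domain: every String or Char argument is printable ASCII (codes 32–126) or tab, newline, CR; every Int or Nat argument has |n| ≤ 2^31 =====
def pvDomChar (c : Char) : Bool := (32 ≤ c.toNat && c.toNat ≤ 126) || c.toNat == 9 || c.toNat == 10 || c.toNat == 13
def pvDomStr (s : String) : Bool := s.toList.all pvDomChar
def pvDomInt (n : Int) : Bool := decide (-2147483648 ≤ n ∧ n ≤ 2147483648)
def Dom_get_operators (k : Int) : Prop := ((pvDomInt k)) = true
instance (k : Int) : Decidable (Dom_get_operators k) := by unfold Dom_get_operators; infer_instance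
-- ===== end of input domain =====

-- B replaces A's modular-inverse lookup and seen-set dedup by a recursion over suffixes of the
-- sorted class list with a brute-force congruence test z*o ≡ k (mod 90): an alternative algorithm.

-- ===== PORT A =====
def pvClasses : List Int := [1,7,11,13,17,19,23,29,31,37,41,43,47,49,53,59,61,67,71,73,77,79,83,89]

-- pow(z, -1, 90): the modular inverse in [0,90), none = ValueError (builtin, ported by its spec)
def pvPowNeg1Mod90? (z : Int) : Option Int :=
  ((List.range 90).map (Int.ofNat)).find? (fun t => PySem.Int.mod (z * t) 90 == 1)

def pvStepA (k : Int) (st : List (Int × Int × Int × Int) × PySem.Set (Int × Int)) (z : Int) :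
    List (Int × Int × Int × Int) × PySem.Set (Int × Int) :=
  match pvPowNeg1Mod90? z with
  | none => st            -- ValueError caught: continue
  | some zi =>
    let o := PySem.Int.mod (k * zi) 90
    if o ∈ pvClasses then
      let pair := if z ≤ o then (z, o) else (o, z)   -- tuple(sorted([z, o]))
      if pair ∈ st.2 then st
      else
        let seen := PySem.Set.add st.2 pair
        let z_eff := if z = 1 then (91 : Int) else z
        let o_eff := if o = 1 then (91 : Int) else o
        let l := 180 - (z_eff + o_eff)
        let m := 90 - (z_eff + o_eff) + PySem.Int.floordiv (z_eff * o_eff - k) 90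
        (st.1 ++ [(l, m, z_eff, z)] ++ (if z ≠ o then [(l, m, o_eff, o)] else []), seen)
    else st

def get_operators (k : Int) : List (Int × Int × Int × Int) :=
  (pvClasses.foldl (pvStepA k) ([], PySem.Set.empty)).1

-- ===== PORT B =====
-- the inner loop body's two conditional appends
def pvEntries (k z o : Int) : List (Int × Int × Int × Int) :=
  let z_eff := if z = 1 then (91 : Int) else z
  let o_eff := if o = 1 then (91 : Int) else o
  let l := 180 - (z_eff + o_eff)
  let m := 90 - (z_eff + o_eff) + PySem.Int.floordiv (z_eff * o_eff - k) 90
  [(l, m, z_eff, z)] ++ (if z ≠ o then [(l, m, o_eff, o)] else [])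

-- 'for o in rest: if (z*o - k) % 90 == 0: out.append(...)'
def pvInner (k z : Int) (rest : List Int) : List (Int × Int × Int × Int) :=
  rest.foldl (fun out o => out ++ (if PySem.Int.mod (z * o - k) 90 = 0 then pvEntries k z o else [])) []

-- 'go(rest)': recursion over suffixes
def pvGo (k : Int) : List Int → List (Int × Int × Int × Int)
  | [] => []
  | z :: rest => pvInner k z (z :: rest) ++ pvGo k rest

def get_operators_alt (k : Int) : List (Int × Int × Int × Int) :=
  pvGo k pvClasses

-- ===== PRECONDITION & SPEC =====
def Spec_get_operators (k : Int) (out : List (Int × Int × Int × Int)) : Prop := out = get_operators_alt k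
instance (k : Int) (out : List (Int × Int × Int × Int)) : Decidable (Spec_get_operators k out) := by unfold Spec_get_operators; infer_instance

-- ===== CLAIM (what is proved, stated in full; the proofs are below) =====
def Claim_equal_get_operators : Prop := ∀ (k : Int), Dom_get_operators k → Spec_get_operators k (get_operators k)

-- ===== LEMMAS AND PROOFS =====

-- proof-side helpers: the modular-inverse table and the common 'per-z contribution' form
def pvInv : Int → Int
  | 1 => 1 | 7 => 13 | 11 => 41 | 13 => 7 | 17 => 53 | 19 => 19 | 23 => 47 | 29 => 59
  | 31 => 61 | 37 => 73 | 41 => 11 | 43 => 67 | 47 => 23 | 49 => 79 | 53 => 17 | 59 => 29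
  | 61 => 31 | 67 => 43 | 71 => 71 | 73 => 37 | 77 => 83 | 79 => 49 | 83 => 77 | 89 => 89
  | _ => 0

def pvF (k z : Int) : Int := PySem.Int.mod (k * pvInv z) 90

def pvStepB (k z : Int) : List (Int × Int × Int × Int) :=
  if pvF k z ∈ pvClasses ∧ z ≤ pvF k z then pvEntries k z (pvF k z) else []

def pvMkPair (a b : Int) : Int × Int := if a ≤ b then (a, b) else (b, a)

lemma pvPow_eq (z : Int) (hz : z ∈ pvClasses) : pvPowNeg1Mod90? z = some (pvInv z) := by
  fin_cases hz <;> decide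

lemma pvInv_mul (z : Int) (hz : z ∈ pvClasses) : (z * pvInv z) % 90 = 1 := by
  fin_cases hz <;> decide

lemma pvClasses_bounds (o : Int) (ho : o ∈ pvClasses) : 0 ≤ o ∧ o < 90 := by
  fin_cases ho <;> norm_num

lemma pvCong_iff (k z o : Int) (hz : z ∈ pvClasses) (ho : o ∈ pvClasses) :
    (PySem.Int.mod (z * o - k) 90 = 0 ↔ o = pvF k z) := by
  have hi : (z * pvInv z) % 90 = 1 := pvInv_mul z hz
  have hzi : z * pvInv z ≡ 1 [ZMOD 90] := by
    unfold Int.ModEq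
    rw [hi]
    norm_num
  obtain ⟨hob0, hob1⟩ := pvClasses_bounds o ho
  rw [PySem.Int.mod_eq_emod_of_pos (by norm_num : (0:Int) < 90)]
  unfold pvF
  rw [PySem.Int.mod_eq_emod_of_pos (by norm_num : (0:Int) < 90)]
  constructor
  · intro h
    have hdvd : (90:Int) ∣ z * o - k := Int.dvd_of_emod_eq_zero h
    have hk : z * o ≡ k [ZMOD 90] := Int.modEq_iff_dvd.2 (by simpa [neg_sub] using dvd_neg.mpr hdvd)
    have e2 : o * (z * pvInv z) ≡ k * pvInv z [ZMOD 90] := by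
      have := hk.mul_right (pvInv z)
      rwa [show z * o * pvInv z = o * (z * pvInv z) by ring] at this
    have e1 : o ≡ o * (z * pvInv z) [ZMOD 90] := by
      have := (Int.ModEq.mul_left o hzi).symm
      rwa [mul_one] at this
    have h1 : o ≡ k * pvInv z [ZMOD 90] := e1.trans e2
    rw [← Int.emod_eq_of_lt hob0 hob1]
    exact h1
  · intro h
    have hmm : (k * pvInv z) % 90 ≡ k * pvInv z [ZMOD 90] :=
      Int.emod_emod_of_dvd _ dvd_rfl
    have hko : z * o ≡ k [ZMOD 90] := by
      have h1 : z * o ≡ z * (k * pvInv z) [ZMOD 90] := by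
        rw [h]
        exact Int.ModEq.mul_left z hmm
      have h2 : k * (z * pvInv z) ≡ k * 1 [ZMOD 90] := Int.ModEq.mul_left k hzi
      rw [mul_one] at h2
      calc z * o ≡ z * (k * pvInv z) [ZMOD 90] := h1
        _ = k * (z * pvInv z) := by ring
        _ ≡ k [ZMOD 90] := h2
    exact Int.emod_eq_zero_of_dvd (by simpa [neg_sub] using dvd_neg.mpr hko.dvd)

lemma pvInvolution (k z : Int) (hz : z ∈ pvClasses) (ho : pvF k z ∈ pvClasses) :
    pvF k (pvF k z) = z := by
  have h0 : PySem.Int.mod (z * pvF k z - k) 90 = 0 := (pvCong_iff k z (pvF k z) hz ho).2 rfl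
  refine ((pvCong_iff k (pvF k z) z ho hz).1 ?_).symm
  rwa [mul_comm]

lemma pvClasses_sorted : pvClasses.Pairwise (· < ·) := by decide

lemma pvClasses_nodup : pvClasses.Nodup := by decide

lemma pvMem_pre_iff {pre rest : List Int} {z o : Int}
    (hsplit : pvClasses = pre ++ z :: rest) (ho : o ∈ pvClasses) :
    (o ∈ pre ↔ o < z) := by
  have hp : (pre ++ z :: rest).Pairwise (· < ·) := by rw [← hsplit]; exact pvClasses_sorted
  rw [List.pairwise_append] at hp
  obtain ⟨hpre, hzr, hcross⟩ := hp
  constructor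
  · intro hmem; exact hcross o hmem z (by simp)
  · intro hlt
    rw [hsplit] at ho
    rcases List.mem_append.1 ho with h | h
    · exact h
    · rcases List.mem_cons.1 h with h | h
      · omega
      · have := (List.pairwise_cons.1 hzr).1 o h; omega

lemma pvZ_notin_pre {pre rest : List Int} {z : Int} (hsplit : pvClasses = pre ++ z :: rest) :
    z ∉ pre := by
  have hp : (pre ++ z :: rest).Pairwise (· < ·) := by rw [← hsplit]; exact pvClasses_sorted
  rw [List.pairwise_append] at hp
  intro hmem
  have := hp.2.2 z hmem z (by simp)
  omega

lemma pvMkPair_eq {a b c d : Int} (h : pvMkPair a b = pvMkPair c d) :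
    (a = c ∧ b = d) ∨ (a = d ∧ b = c) := by
  unfold pvMkPair at h
  split_ifs at h <;> simp only [Prod.mk.injEq] at h <;> tauto

lemma pvMkPair_comm (a b : Int) : pvMkPair a b = pvMkPair b a := by
  unfold pvMkPair
  split_ifs <;> simp [Prod.ext_iff] <;> omega

-- the loop invariant for A: 'seen' contains exactly the sorted pairs of the processed prefix
def pvInvSeen (k : Int) (pre : List Int) (seen : PySem.Set (Int × Int)) : Prop :=
  ∀ p : Int × Int, p ∈ seen ↔ ∃ z' ∈ pre, pvF k z' ∈ pvClasses ∧ p = pvMkPair z' (pvF k z')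

lemma pvLoop_eq (k : Int) : ∀ (suf pre : List Int) (acc : List (Int × Int × Int × Int))
    (seen : PySem.Set (Int × Int)),
    pvClasses = pre ++ suf → pvInvSeen k pre seen →
    (suf.foldl (pvStepA k) (acc, seen)).1 = acc ++ suf.flatMap (pvStepB k) := by
  intro suf
  induction suf with
  | nil => intro pre acc seen _ _; simp
  | cons z rest ih =>
    intro pre acc seen hsplit hinv
    have hzmem : z ∈ pvClasses := by rw [hsplit]; simp
    have hstepA : pvStepA k (acc, seen) z =
        (if pvF k z ∈ pvClasses then
           if pvMkPair z (pvF k z) ∈ seen then (acc, seen)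
           else (acc ++ pvEntries k z (pvF k z), PySem.Set.add seen (pvMkPair z (pvF k z)))
         else (acc, seen)) := by
      simp only [pvStepA, pvPow_eq z hzmem, pvEntries, pvMkPair, pvF, List.append_assoc]
    rw [List.foldl_cons, List.flatMap_cons, hstepA]
    have hz_notin := pvZ_notin_pre hsplit
    by_cases hoC : pvF k z ∈ pvClasses
    · have hpre_iff := pvMem_pre_iff hsplit hoC
      have hfkO : pvF k (pvF k z) = z := pvInvolution k z hzmem hoC
      have hpair_mem : (pvMkPair z (pvF k z) ∈ seen) ↔ pvF k z < z := by
        constructor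
        · intro hmem
          rcases (hinv _).1 hmem with ⟨z', hz', hfz', hpeq⟩
          rcases pvMkPair_eq hpeq with ⟨h1, h2⟩ | ⟨h1, h2⟩
          · exact absurd (by rw [h1]; exact hz') hz_notin
          · exact hpre_iff.1 (by rw [h2]; exact hz')
        · intro hlt
          exact (hinv _).2 ⟨pvF k z, hpre_iff.2 hlt, by rw [hfkO]; exact hzmem,
            by rw [hfkO]; exact pvMkPair_comm z (pvF k z)⟩
      by_cases hle : z ≤ pvF k z
      · -- kept by both
        have hnot : ¬ (pvMkPair z (pvF k z) ∈ seen) := by rw [hpair_mem]; omega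
        rw [if_pos hoC, if_neg hnot]
        have hB : pvStepB k z = pvEntries k z (pvF k z) := by
          unfold pvStepB
          rw [if_pos ⟨hoC, hle⟩]
        rw [hB]
        have hnext := ih (pre ++ [z]) (acc ++ pvEntries k z (pvF k z))
          (PySem.Set.add seen (pvMkPair z (pvF k z))) (by rw [hsplit]; simp) ?_
        · rw [hnext, List.append_assoc]
        · intro p
          rw [PySem.Set.mem_add]
          constructor
          · rintro (hp | rfl)
            · rcases (hinv p).1 hp with ⟨z', h1, h2, h3⟩
              exact ⟨z', by simp [h1], h2, h3⟩
            · exact ⟨z, by simp, hoC, rfl⟩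
          · rintro ⟨z', hz', h2, h3⟩
            rcases List.mem_append.1 hz' with h | h
            · exact Or.inl ((hinv p).2 ⟨z', h, h2, h3⟩)
            · simp at h
              subst h
              exact Or.inr h3
      · -- pvF k z < z: A skips via seen, B skips via z ≤ o
        have hyes : (pvMkPair z (pvF k z) ∈ seen) := by rw [hpair_mem]; omega
        rw [if_pos hoC, if_pos hyes]
        have hB : pvStepB k z = [] := by
          unfold pvStepB
          rw [if_neg (by tauto)]
        rw [hB]
        have hnext := ih (pre ++ [z]) acc seen (by rw [hsplit]; simp) ?_
        · rw [hnext]; simp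
        · intro p
          constructor
          · intro hp
            rcases (hinv p).1 hp with ⟨z', h1, h2, h3⟩
            exact ⟨z', by simp [h1], h2, h3⟩
          · rintro ⟨z', hz', h2, h3⟩
            rcases List.mem_append.1 hz' with h | h
            · exact (hinv p).2 ⟨z', h, h2, h3⟩
            · simp at h
              subst h
              rw [h3]
              exact hyes
    · -- pvF k z not in classes: both skip
      rw [if_neg hoC]
      have hB : pvStepB k z = [] := by
        unfold pvStepB
        rw [if_neg (by tauto)]
      rw [hB]
      have hnext := ih (pre ++ [z]) acc seen (by rw [hsplit]; simp) ?_
      · rw [hnext]; simp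
      · intro p
        constructor
        · intro hp
          rcases (hinv p).1 hp with ⟨z', h1, h2, h3⟩
          exact ⟨z', by simp [h1], h2, h3⟩
        · rintro ⟨z', hz', h2, h3⟩
          rcases List.mem_append.1 hz' with h | h
          · exact (hinv p).2 ⟨z', h, h2, h3⟩
          · simp at h
            subst h
            exact absurd h2 hoC

-- the inner loop is a flatMap
lemma pvInner_flatMap (k z : Int) (l : List Int) :
    pvInner k z l =
      l.flatMap (fun o => if PySem.Int.mod (z * o - k) 90 = 0 then pvEntries k z o else []) := by
  unfold pvInner
  exact PySem.List.foldl_append_eq_flatMap _ _ _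

-- with nodup and subset, the inner loop yields exactly the (at most one) match
lemma pvInner_eq (k z : Int) (hz : z ∈ pvClasses) :
    ∀ l : List Int, l.Nodup → (∀ o ∈ l, o ∈ pvClasses) →
      pvInner k z l = if pvF k z ∈ l then pvEntries k z (pvF k z) else [] := by
  intro l
  induction l with
  | nil => intro _ _; simp [pvInner]
  | cons o t ih =>
    intro hnd hsub
    rw [pvInner_flatMap, List.flatMap_cons, ← pvInner_flatMap]
    have hoC : o ∈ pvClasses := hsub o (by simp)
    rw [List.nodup_cons] at hnd
    have hih := ih hnd.2 (fun x hx => hsub x (by simp [hx]))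
    by_cases heq : o = pvF k z
    · have : PySem.Int.mod (z * o - k) 90 = 0 := (pvCong_iff k z o hz hoC).2 heq
      rw [if_pos this, hih, if_neg (by rw [← heq]; exact hnd.1),
          if_pos (by rw [← heq]; simp)]
      simp [heq]
    · have : ¬ PySem.Int.mod (z * o - k) 90 = 0 := fun h => heq ((pvCong_iff k z o hz hoC).1 h)
      rw [if_neg this, hih]
      have hmem : (pvF k z ∈ o :: t) ↔ pvF k z ∈ t := by
        simp only [List.mem_cons]
        constructor
        · rintro (h | h)
          · exact absurd h.symm heq
          · exact h
        · exact Or.inr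
      rw [List.nil_append]
      exact (if_congr hmem.symm rfl rfl)

-- B's suffix recursion equals the common form
lemma pvGo_eq (k : Int) : ∀ (suf pre : List Int), pvClasses = pre ++ suf →
    pvGo k suf = suf.flatMap (pvStepB k) := by
  intro suf
  induction suf with
  | nil => intro _ _; simp [pvGo]
  | cons z rest ih =>
    intro pre hsplit
    have hzmem : z ∈ pvClasses := by rw [hsplit]; simp
    have hnd : (z :: rest).Nodup := by
      have := pvClasses_nodup
      rw [hsplit] at this
      exact this.of_append_right
    have hsub : ∀ o ∈ z :: rest, o ∈ pvClasses := by
      intro o ho; rw [hsplit]; exact List.mem_append.2 (Or.inr ho)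
    rw [pvGo, pvInner_eq k z hzmem _ hnd hsub, List.flatMap_cons,
        ih (pre ++ [z]) (by rw [hsplit]; simp)]
    congr 1
    by_cases hoC : pvF k z ∈ pvClasses
    · have hpre_iff := pvMem_pre_iff hsplit hoC
      have hmem : (pvF k z ∈ z :: rest) ↔ z ≤ pvF k z := by
        constructor
        · intro h
          by_contra hlt
          rw [Int.not_le] at hlt
          have hin_pre : pvF k z ∈ pre := hpre_iff.2 hlt
          have hn := pvClasses_nodup
          rw [hsplit, List.nodup_append] at hn
          exact hn.2.2 _ hin_pre _ h rfl
        · intro hle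
          have hoC' : pvF k z ∈ pre ++ z :: rest := by rw [← hsplit]; exact hoC
          rcases List.mem_append.1 hoC' with h | h
          · have := hpre_iff.1 h
            omega
          · exact h
      unfold pvStepB
      by_cases hle : z ≤ pvF k z
      · rw [if_pos (hmem.2 hle), if_pos ⟨hoC, hle⟩]
      · rw [if_neg (fun h => hle (hmem.1 h)), if_neg (by tauto)]
    · have hnm : pvF k z ∉ z :: rest := fun h => hoC (hsub _ h)
      unfold pvStepB
      rw [if_neg hnm, if_neg (by tauto)]

-- ===== VERDICT (by name: the statement is the Claim_ definition above) =====
theorem get_operators_spec : Claim_equal_get_operators := by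
  intro k _
  unfold Spec_get_operators get_operators get_operators_alt
  rw [pvGo_eq k pvClasses [] (by simp),
      pvLoop_eq k pvClasses [] [] PySem.Set.empty (by simp)
        (by intro p; simp [PySem.Set.empty])]
  simp
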